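-- pv_equiv track=rewrite | github.com/D4RKL0RD-J0571N/the-vault | backend/vault/parser/symbol_types.py | detect_todo_comments
-- ===== SOURCE A (Python) =====
-- def detect_todo_comments(source_code: str) -> bool:
--     """Detect if source code contains TODO or FIXME comments."""
--     if not source_code:
--         return False
--
--     # Common TODO patterns across languages
--     todo_patterns = [
--         "TODO",
--         "FIXME",
--         "HACK",
--         "XXX",
--         "NOTE",
--         "BUG",
--     ]
--
--     source_upper = source_code.upper()
--
--     return any(pattern in source_upper for pattern in todo_patterns)
-- ===== SOURCE B (Python) =====
-- _KEYWORDS = ("TODO", "FIXME", "HACK", "XXX", "NOTE", "BUG")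
--
-- def detect_todo_comments(source_code: str) -> bool:
--     """Single left-to-right pass: at each position, test whether any keyword starts there."""
--     u = source_code.upper()
--     for i in range(len(u)):
--         if any(u.startswith(kw, i) for kw in _KEYWORDS):
--             return True
--     return False
-- ===== Notes on version B (the rewrite author's own statement) =====
-- stated objective: alternative
-- what changed: Replaced six separate substring scans over the uppercased source with one left-to-right pass that tests at each position whether any of the six keywords starts there (the scan a regex alternation would do); the redundant empty-string guard is dropped since the scan already yields False.
import Mathlib
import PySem

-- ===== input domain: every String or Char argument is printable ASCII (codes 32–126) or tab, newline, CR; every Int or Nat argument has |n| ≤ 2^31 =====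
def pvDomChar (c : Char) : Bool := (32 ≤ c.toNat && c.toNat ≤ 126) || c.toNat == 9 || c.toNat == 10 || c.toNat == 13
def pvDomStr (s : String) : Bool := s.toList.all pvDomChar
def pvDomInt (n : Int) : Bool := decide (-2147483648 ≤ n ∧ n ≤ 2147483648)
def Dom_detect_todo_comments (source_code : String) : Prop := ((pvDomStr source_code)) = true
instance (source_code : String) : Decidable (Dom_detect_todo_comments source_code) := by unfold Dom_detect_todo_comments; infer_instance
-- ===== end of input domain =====

-- B replaces A's six separate substring scans by one left-to-right pass that checks,
-- at each position of the uppercased source, whether any keyword starts there (objective: alternative).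


-- ===== PORT A =====
def detect_todo_comments (source_code : String) : Bool :=
  if source_code = "" then false
  else
    let todo_patterns : List String := ["TODO", "FIXME", "HACK", "XXX", "NOTE", "BUG"]
    let source_upper := PySem.Str.upper source_code
    todo_patterns.any (fun pattern => PySem.Str.isIn pattern source_upper)

-- ===== PORT B =====
def pvKeywords : List (List Char) :=
  ["TODO".toList, "FIXME".toList, "HACK".toList, "XXX".toList, "NOTE".toList, "BUG".toList]

-- the loop 'for i in range(len(u)): if any(u.startswith(kw, i) ...)' as a scan over suffixes
def pvScan (u : List Char) : Bool :=
  match u with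
  | [] => false
  | c :: rest =>
    if pvKeywords.any (fun kw => PySem.Chars.startswith (c :: rest) kw) then true
    else pvScan rest

def detect_todo_comments_alt (source_code : String) : Bool :=
  pvScan (PySem.Str.upper source_code).toList

-- ===== PRECONDITION & SPEC =====
def Spec_detect_todo_comments (source_code : String) (out : Bool) : Prop := out = detect_todo_comments_alt source_code
instance (source_code : String) (out : Bool) : Decidable (Spec_detect_todo_comments source_code out) := by unfold Spec_detect_todo_comments; infer_instance

-- ===== CLAIM (what is proved, stated in full; the proofs are below) =====
def Claim_equal_detect_todo_comments : Prop := ∀ (source_code : String), Dom_detect_todo_comments source_code → Spec_detect_todo_comments source_code (detect_todo_comments source_code)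

-- ===== LEMMAS AND PROOFS =====

lemma pvScan_eq_any_isIn (u : List Char) :
    pvScan u = pvKeywords.any (fun kw => PySem.Chars.isIn kw u) := by
  induction u with
  | nil => decide
  | cons c rest ih =>
    simp only [pvScan, ih]
    by_cases h : pvKeywords.any (fun kw => PySem.Chars.startswith (c :: rest) kw) = true
    · simp only [h, if_true]
      rcases List.any_eq_true.mp h with ⟨kw, hkw, hs⟩
      exact (List.any_eq_true.mpr ⟨kw, hkw, by
        simp [PySem.Chars.isIn_iff_infix, List.infix_cons_iff,
          Or.inl ((PySem.Chars.startswith_iff _ _).mp hs)]⟩).symm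
    · simp only [h]
      apply Eq.symm
      cases hr : pvKeywords.any (fun kw => PySem.Chars.isIn kw rest) with
      | true =>
        rcases List.any_eq_true.mp hr with ⟨kw, hkw, hs⟩
        exact List.any_eq_true.mpr ⟨kw, hkw, by
          simp [PySem.Chars.isIn_iff_infix] at hs ⊢
          exact List.infix_cons_iff.mpr (Or.inr hs)⟩
      | false =>
        apply List.any_eq_false.mpr
        intro kw hkw
        have h1 := List.any_eq_false.mp (Bool.eq_false_iff.mpr h) kw hkw
        have h2 := List.any_eq_false.mp hr kw hkw
        simp only [Bool.not_eq_true] at h1 h2 ⊢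
        rw [PySem.Chars.isIn_eq_false_iff] at h2 ⊢
        intro hcontra
        rcases List.infix_cons_iff.mp hcontra with hp | hi
        · exact absurd ((PySem.Chars.startswith_iff (c :: rest) kw).mpr hp) (by simp [h1])
        · exact h2 hi

-- ===== VERDICT (by name: the statement is the Claim_ definition above) =====
theorem detect_todo_comments_spec : Claim_equal_detect_todo_comments := by
  intro s _
  unfold Spec_detect_todo_comments detect_todo_comments detect_todo_comments_alt
  rw [pvScan_eq_any_isIn]
  by_cases hs : s = ""
  · subst hs; decide
  · simp only [hs, if_false]
    simp only [pvKeywords, List.any_cons, List.any_nil, PySem.Str.isIn_eq]
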